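-- pv_equiv track=rewrite | github.com/WonJoonoThomasChoi/CodingChallenge_Python | ProgrammersSchool/모의고사.py | solution
-- ===== SOURCE A (Python) =====
-- def solution(answers):
--     sa = [1,2,3,4,5]
--     aScore=0
--     sb = [2,1,2,3,2,4,2,5]
--     bScore=0
--     sc = [3,3,1,1,2,2,4,4,5,5]
--     cScore=0
--     for i in range(len(answers)):
--         if sa[i%len(sa)]==answers[i]:
--             aScore+=1
--         if sb[i%len(sb)]==answers[i]:
--             bScore+=1
--         if sc[i%len(sc)]==answers[i]:
--             cScore+=1
--     alist = {1:aScore, 2:bScore, 3:cScore}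
--     return [ k for k, v in alist.items() if v == max(alist.values())]
-- ===== SOURCE B (Python) =====
-- def solution(answers):
--     P = 40  # lcm of the three pattern periods 5, 8, 10
--     cnt = {}
--     for i, v in enumerate(answers):
--         k = (i % P, v)
--         cnt[k] = cnt.get(k, 0) + 1
--     patterns = [[1, 2, 3, 4, 5],
--                 [2, 1, 2, 3, 2, 4, 2, 5],
--                 [3, 3, 1, 1, 2, 2, 4, 4, 5, 5]]
--     scores = [sum(cnt.get((r, p[r % len(p)]), 0) for r in range(P))
--               for p in patterns]
--     best = max(scores)
--     return [i + 1 for i, s in enumerate(scores) if s == best]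
-- ===== Notes on version B (the rewrite author's own statement) =====
-- stated objective: alternative
-- what changed: B replaces A's per-element comparison against the three patterns by a hash-index algorithm: one pass buckets answers into a dict keyed by (index mod 40, value) (40 = lcm of the pattern periods), then each student's score is a sum of 40 dict lookups against the pattern table, with no per-element pattern comparison at all.
import Mathlib
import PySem

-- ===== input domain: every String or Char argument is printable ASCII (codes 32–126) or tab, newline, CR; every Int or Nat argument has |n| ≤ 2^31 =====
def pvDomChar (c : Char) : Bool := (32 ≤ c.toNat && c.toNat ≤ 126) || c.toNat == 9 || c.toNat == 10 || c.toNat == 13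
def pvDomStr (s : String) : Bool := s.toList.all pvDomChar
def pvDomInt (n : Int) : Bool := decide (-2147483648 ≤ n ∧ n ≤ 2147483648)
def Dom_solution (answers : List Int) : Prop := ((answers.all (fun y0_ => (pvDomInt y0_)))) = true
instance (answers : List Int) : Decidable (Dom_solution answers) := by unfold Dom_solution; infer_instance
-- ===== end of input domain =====

-- B replaces A's per-element comparisons against the three patterns by a hash index:
-- one bucketing pass keyed by (i mod 40, value) (40 = lcm of the pattern periods), then
-- each score is a sum of 40 dict lookups; same O(n) cost, different algorithm.

-- ===== PORT A =====
-- literal port of A: one fold over range(len(answers)) carrying the triple (aScore,bScore,cScore);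
-- pyGetD's default is never used (indices are in range), max? is some (3 values).
def solution (answers : List Int) : List Int :=
  let sa : List Int := [1,2,3,4,5]
  let sb : List Int := [2,1,2,3,2,4,2,5]
  let sc : List Int := [3,3,1,1,2,2,4,4,5,5]
  let st := (PySem.List.pyRange 0 (answers.length : Int) 1).foldl
    (fun (st : Int × Int × Int) i =>
      let a := if PySem.List.pyGetD sa (PySem.Int.mod i (sa.length : Int)) 0 == PySem.List.pyGetD answers i 0 then st.1 + 1 else st.1
      let b := if PySem.List.pyGetD sb (PySem.Int.mod i (sb.length : Int)) 0 == PySem.List.pyGetD answers i 0 then st.2.1 + 1 else st.2.1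
      let c := if PySem.List.pyGetD sc (PySem.Int.mod i (sc.length : Int)) 0 == PySem.List.pyGetD answers i 0 then st.2.2 + 1 else st.2.2
      (a, b, c)) ((0 : Int), (0 : Int), (0 : Int))
  let alist := (((PySem.Dict.empty : PySem.Dict Int Int).insert 1 st.1).insert 2 st.2.1).insert 3 st.2.2
  let m := (PySem.List.max? alist.values (fun x => x)).getD 0
  alist.items.foldl (fun acc p => if p.2 == m then acc ++ [p.1] else acc) []

-- ===== PORT B =====
-- port of Source B: bucket counts keyed by (i % 40, v), built in one pass over enumerate(answers)
def buckets (answers : List Int) : PySem.Dict (Int × Int) Int :=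
  (PySem.List.enumerate answers 0).foldl
    (fun (d : PySem.Dict (Int × Int) Int) p =>
      let k : Int × Int := (PySem.Int.mod p.1 40, p.2)
      d.insert k (d.getD k 0 + 1)) PySem.Dict.empty

def solution_alt (answers : List Int) : List Int :=
  let cnt := buckets answers
  let patterns : List (List Int) :=
    [[1,2,3,4,5], [2,1,2,3,2,4,2,5], [3,3,1,1,2,2,4,4,5,5]]
  let scores := patterns.map (fun p =>
    ((PySem.List.pyRange 0 40 1).map (fun r =>
      cnt.getD (r, PySem.List.pyGetD p (PySem.Int.mod r (p.length : Int)) 0) 0)).sum)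
  let best := (PySem.List.max? scores (fun x => x)).getD 0
  (PySem.List.enumerate scores 0).foldl
    (fun acc q => if q.2 == best then acc ++ [q.1 + 1] else acc) []

-- ===== PRECONDITION & SPEC =====
def Spec_solution (answers : List Int) (out : List Int) : Prop := out = solution_alt answers
instance (answers : List Int) (out : List Int) : Decidable (Spec_solution answers out) := by unfold Spec_solution; infer_instance

-- ===== CLAIM (what is proved, stated in full; the proofs are below) =====
def Claim_equal_solution : Prop := ∀ (answers : List Int), Dom_solution answers → Spec_solution answers (solution answers)

-- ===== LEMMAS AND PROOFS =====

-- a fold with a componentwise triple step splits into three independent folds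
theorem foldl_prod3 (l : List Int) (f g h : Int → Int → Int) (a b c : Int) :
    l.foldl (fun (st : Int × Int × Int) i => (f st.1 i, g st.2.1 i, h st.2.2 i)) (a, b, c)
      = (l.foldl f a, l.foldl g b, l.foldl h c) := by
  induction l generalizing a b c with
  | nil => rfl
  | cons x t ih => simpa [List.foldl] using ih (f a x) (g b x) (h c x)

-- summing "if r = a then f r else 0" over a nodup list containing a gives f a
theorem sum_indicator_of_mem (R : List Int) (a : Int) (f : Int → Int)
    (hnd : R.Nodup) (ha : a ∈ R) :
    (R.map (fun r => if r = a then f r else 0)).sum = f a := by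
  induction R with
  | nil => cases ha
  | cons r R' ih =>
    by_cases h : r = a
    · have hnr : r ∉ R' := (List.nodup_cons.mp hnd).1
      have hz : (R'.map (fun x => if x = a then f x else 0)).sum = 0 := by
        apply List.sum_eq_zero
        intro y hy
        rcases List.mem_map.mp hy with ⟨x, hx, rfl⟩
        have hxa : x ≠ a := by
          intro e
          exact hnr (by rw [h, ← e]; exact hx)
        simp [hxa]
      simp [hz, h]
    · have ha' : a ∈ R' := by
        rcases List.mem_cons.mp ha with h' | h'
        · exact absurd h'.symm h
        · exact h'
      simp only [List.map_cons, List.sum_cons, if_neg h, zero_add]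
      exact ih (List.nodup_cons.mp hnd).2 ha'

-- the bucket-sum identity: summing per-key counts over a nodup key list R that covers all
-- first components of M equals one countP over M
theorem sum_count_eq_countP (R : List Int) (M : List (Int × Int)) (t : Int → Int)
    (hnd : R.Nodup) (hcov : ∀ m ∈ M, m.1 ∈ R) :
    (R.map (fun r => ((M.count (r, t r) : Int)))).sum
      = ((M.countP (fun m => m.2 == t m.1) : Int)) := by
  induction M with
  | nil => simp
  | cons m M' ih =>
    have hcov' : ∀ x ∈ M', x.1 ∈ R := fun x hx => hcov x (List.mem_cons_of_mem _ hx)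
    have hm : m.1 ∈ R := hcov m (List.mem_cons_self ..)
    have hstep : ∀ r : Int, ((m :: M').count (r, t r) : Int)
        = (M'.count (r, t r) : Int) + (if r = m.1 then (if m.2 = t m.1 then (1:Int) else 0) else 0) := by
      intro r
      by_cases h1 : r = m.1
      · subst h1
        rw [List.count_cons]
        by_cases h2 : m.2 = t m.1
        · simp [beq_iff_eq, Prod.ext_iff, h2]
        · simp [beq_iff_eq, Prod.ext_iff, h2]
      · have hne : ¬ m.1 = r := fun e => h1 e.symm
        rw [List.count_cons]
        simp [beq_iff_eq, Prod.ext_iff, hne, h1]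
    calc (R.map (fun r => (((m :: M').count (r, t r) : Int)))).sum
        = (R.map (fun r => (M'.count (r, t r) : Int)
            + (if r = m.1 then (if m.2 = t m.1 then (1:Int) else 0) else 0))).sum :=
          congrArg List.sum (List.map_congr_left (fun r _ => hstep r))
      _ = (R.map (fun r => (M'.count (r, t r) : Int))).sum
            + (R.map (fun r => if r = m.1 then (if m.2 = t m.1 then (1:Int) else 0) else 0)).sum :=
          PySem.List.sum_map_add_int R _ _
      _ = ((M'.countP (fun x => x.2 == t x.1) : Int)) + (if m.2 = t m.1 then (1:Int) else 0) := by
          rw [ih hcov', sum_indicator_of_mem R m.1 (fun _ => if m.2 = t m.1 then (1:Int) else 0) hnd hm]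
      _ = (((m :: M').countP (fun x => x.2 == t x.1) : Int)) := by
          rw [List.countP_cons]
          by_cases h : m.2 = t m.1 <;> simp [h]

-- the per-pattern score: B's 40 bucket lookups equal A's scan count,
-- for any pattern whose length is positive and divides 40
theorem bucket_score_eq (pat answers : List Int)
    (hpos : 0 < (pat.length : Int)) (hdvd : (pat.length : Int) ∣ 40) :
    ((PySem.List.pyRange 0 40 1).map (fun r =>
        (buckets answers).getD (r, PySem.List.pyGetD pat (PySem.Int.mod r (pat.length : Int)) 0) 0)).sum
      = (PySem.List.pyRange 0 (answers.length : Int) 1).foldl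
          (fun s i => if PySem.List.pyGetD pat (PySem.Int.mod i (pat.length : Int)) 0
                        == PySem.List.pyGetD answers i 0 then s + 1 else s) 0 := by
  set t : Int → Int := fun r => PySem.List.pyGetD pat (PySem.Int.mod r (pat.length : Int)) 0 with ht
  set M : List (Int × Int) :=
    (PySem.List.enumerate answers 0).map (fun p => (PySem.Int.mod p.1 40, p.2)) with hM
  -- (a) every bucket lookup is a count in M
  have hbk : ∀ k : Int × Int, (buckets answers).getD k 0 = (M.count k : Int) := by
    intro k
    have hb : buckets answers
        = M.foldl (fun (d : PySem.Dict (Int × Int) Int) x => d.insert x (d.getD x 0 + 1))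
            PySem.Dict.empty := by
      rw [hM, List.foldl_map]; rfl
    rw [hb, PySem.Dict.getD_foldl_insert_add_one]
    simp
  -- (b) t is 40-periodic
  have hper : ∀ i : Int, t (PySem.Int.mod i 40) = t i := by
    intro i
    have h40 : (0:Int) < 40 := by norm_num
    simp only [ht]
    rw [PySem.Int.mod_eq_emod_of_pos hpos, PySem.Int.mod_eq_emod_of_pos hpos,
        PySem.Int.mod_eq_emod_of_pos h40, Int.emod_emod_of_dvd i hdvd]
  -- (c) sum of 40 counts = one countP over M
  have hnd : (PySem.List.pyRange 0 40 1).Nodup := PySem.List.nodup_pyRange_one 0 40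
  have hcov : ∀ m ∈ M, m.1 ∈ PySem.List.pyRange 0 40 1 := by
    intro m hm
    rcases List.mem_map.mp hm with ⟨p, _, rfl⟩
    exact PySem.List.mem_pyRange_one.mpr
      ⟨PySem.Int.mod_nonneg p.1 (by norm_num), PySem.Int.mod_lt p.1 (by norm_num)⟩
  have hsum := sum_count_eq_countP (PySem.List.pyRange 0 40 1) M t hnd hcov
  simp only [← hbk] at hsum
  -- (d) A's range fold is a countP over enumerate
  have hA : (PySem.List.pyRange 0 (answers.length : Int) 1).foldl
        (fun s i => if t i == PySem.List.pyGetD answers i 0 then s + 1 else s) 0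
      = ((PySem.List.enumerate answers 0).countP (fun p => t p.1 == p.2) : Int) := by
    rw [PySem.List.enumerate_eq_map_pyRange (d := 0), List.countP_map]
    have hf := PySem.List.foldl_count_if
      (fun i : Int => t i == PySem.List.pyGetD answers i 0)
      (PySem.List.pyRange 0 (answers.length : Int) 1) 0
    simp only [PySem.List.len_eq] at hf ⊢
    simpa [Function.comp] using hf
  rw [hsum, hA, hM, List.countP_map]
  congr 1
  apply List.countP_congr
  intro p _
  simp only [Function.comp_apply, hper p.1, beq_iff_eq]
  exact eq_comm

-- A's fused triple fold over the index range splits into three independent range folds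
theorem fused_split (answers : List Int) :
    (PySem.List.pyRange 0 (answers.length : Int) 1).foldl
      (fun (st : Int × Int × Int) i =>
        (if PySem.List.pyGetD [1,2,3,4,5] (PySem.Int.mod i (([1,2,3,4,5] : List Int).length : Int)) 0 == PySem.List.pyGetD answers i 0 then st.1 + 1 else st.1,
         if PySem.List.pyGetD [2,1,2,3,2,4,2,5] (PySem.Int.mod i (([2,1,2,3,2,4,2,5] : List Int).length : Int)) 0 == PySem.List.pyGetD answers i 0 then st.2.1 + 1 else st.2.1,
         if PySem.List.pyGetD [3,3,1,1,2,2,4,4,5,5] (PySem.Int.mod i (([3,3,1,1,2,2,4,4,5,5] : List Int).length : Int)) 0 == PySem.List.pyGetD answers i 0 then st.2.2 + 1 else st.2.2))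
      ((0 : Int), (0 : Int), (0 : Int))
    = (((PySem.List.pyRange 0 40 1).map (fun r =>
          (buckets answers).getD (r, PySem.List.pyGetD [1,2,3,4,5] (PySem.Int.mod r (([1,2,3,4,5] : List Int).length : Int)) 0) 0)).sum,
       ((PySem.List.pyRange 0 40 1).map (fun r =>
          (buckets answers).getD (r, PySem.List.pyGetD [2,1,2,3,2,4,2,5] (PySem.Int.mod r (([2,1,2,3,2,4,2,5] : List Int).length : Int)) 0) 0)).sum,
       ((PySem.List.pyRange 0 40 1).map (fun r =>
          (buckets answers).getD (r, PySem.List.pyGetD [3,3,1,1,2,2,4,4,5,5] (PySem.Int.mod r (([3,3,1,1,2,2,4,4,5,5] : List Int).length : Int)) 0) 0)).sum) := by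
  have h := foldl_prod3 (PySem.List.pyRange 0 (answers.length : Int) 1)
    (fun s i => if PySem.List.pyGetD [1,2,3,4,5] (PySem.Int.mod i (([1,2,3,4,5] : List Int).length : Int)) 0 == PySem.List.pyGetD answers i 0 then s + 1 else s)
    (fun s i => if PySem.List.pyGetD [2,1,2,3,2,4,2,5] (PySem.Int.mod i (([2,1,2,3,2,4,2,5] : List Int).length : Int)) 0 == PySem.List.pyGetD answers i 0 then s + 1 else s)
    (fun s i => if PySem.List.pyGetD [3,3,1,1,2,2,4,4,5,5] (PySem.Int.mod i (([3,3,1,1,2,2,4,4,5,5] : List Int).length : Int)) 0 == PySem.List.pyGetD answers i 0 then s + 1 else s)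
    0 0 0
  rw [h]
  refine Prod.ext ?_ (Prod.ext ?_ ?_)
  · exact (bucket_score_eq [1,2,3,4,5] answers (by norm_num) (by norm_num)).symm
  · exact (bucket_score_eq [2,1,2,3,2,4,2,5] answers (by norm_num) (by norm_num)).symm
  · exact (bucket_score_eq [3,3,1,1,2,2,4,4,5,5] answers (by norm_num) (by norm_num)).symm

-- ===== VERDICT (by name: the statement is the Claim_ definition above) =====
set_option maxRecDepth 4096 in
theorem solution_spec : Claim_equal_solution := by
  unfold Claim_equal_solution Spec_solution
  intro answers _
  have h := fused_split answers
  simp only [solution, solution_alt, h]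
  simp [PySem.List.enumerate, List.foldl, PySem.Dict.insert, PySem.Dict.empty,
        PySem.Dict.values, PySem.Dict.contains]
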